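-- pv_equiv track=rewrite | github.com/joseluis-hd/Compilers | Module II/4_1_syntactic.py | tokenizar
-- ===== SOURCE A (Python) =====
-- from typing import List, Optional
--
-- def tokenizar(fuente: str):
--     i = 0
--     n = len(fuente)
--     tokens: List[str] = []
--     lineas: List[int] = []
--     linea = 1
--
--     def push(tok: str):
--         tokens.append(tok)
--         lineas.append(linea)
--
--     while i < n:
--         c = fuente[i]
--
--         if c == '\n':
--             linea += 1
--             i += 1
--             continue
--
--         if c.isspace():
--             i += 1
--             continue
--
--         if c.isalpha():
--             j = i + 1
--             while j < n and fuente[j].isalpha():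
--                 j += 1
--             lex = fuente[i:j]
--             push(lex)
--             i = j
--             continue
--
--         if c.isdigit():
--             j = i + 1
--             while j < n and fuente[j].isdigit():
--                 j += 1
--             num = fuente[i:j]
--             push(num)
--             i = j
--             continue
--
--         if c in '{}();=+-*/%':
--             push(c)
--             i += 1
--             continue
--
--         push(c)
--         i += 1
--
--     return tokens, lineas
-- ===== SOURCE B (Python) =====
-- def tokenizar(fuente: str):
--     tokens = []
--     lineas = []
--     linea = 1
--     buf = ''
--     cls = None  # 'a' alpha run, 'd' digit run
--
--     for c in fuente:
--         if c.isalpha():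
--             k = 'a'
--         elif c.isdigit():
--             k = 'd'
--         else:
--             k = None
--
--         if k is not None and k == cls:
--             buf += c
--         else:
--             if buf:
--                 tokens.append(buf)
--                 lineas.append(linea)
--                 buf = ''
--                 cls = None
--             if k is not None:
--                 buf = c
--                 cls = k
--             elif c == '\n':
--                 linea += 1
--             elif not c.isspace():
--                 tokens.append(c)
--                 lineas.append(linea)
--
--     if buf:
--         tokens.append(buf)
--         lineas.append(linea)
--     return tokens, lineas
-- ===== Notes on version B (the rewrite author's own statement) =====
-- stated objective: alternative
-- what changed: Replaces A's index-based scanner, whose inner while-loops consume a whole alpha/digit run and slice it out, by a single flat fold over the characters that maintains a current-token buffer plus its class and flushes it at class boundaries.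
import Mathlib
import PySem

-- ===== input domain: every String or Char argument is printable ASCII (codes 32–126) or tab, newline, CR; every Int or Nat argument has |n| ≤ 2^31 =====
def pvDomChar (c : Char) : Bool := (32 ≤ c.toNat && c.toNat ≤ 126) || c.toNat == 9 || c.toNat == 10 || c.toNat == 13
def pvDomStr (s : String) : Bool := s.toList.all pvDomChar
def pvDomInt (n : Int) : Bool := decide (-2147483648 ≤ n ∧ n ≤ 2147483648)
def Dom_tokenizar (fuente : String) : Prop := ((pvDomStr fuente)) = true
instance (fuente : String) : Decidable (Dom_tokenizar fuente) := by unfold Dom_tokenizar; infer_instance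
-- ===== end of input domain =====

-- B replaces A's index-based scanner with inner run-consuming while-loops by a single flat
-- character fold maintaining a current-token buffer and its class (alternative decomposition,
-- same O(n) cost).

-- ===== PORT A =====
-- A's inner `while j < n and fuente[j].isalpha(): j += 1` plus the slice fuente[i:j],
-- ported by hand (exact): it returns (the scanned run, the remaining characters).
def pvRunWhile (p : Char → Bool) : List Char → List Char × List Char
  | [] => ([], [])
  | c :: cs =>
    if p c then
      let r := pvRunWhile p cs
      (c :: r.1, r.2)
    else ([], c :: cs)

-- needed by pvLoopA's termination proof (cited in decreasing_by)
theorem pvRunWhile_snd_length_le (p : Char → Bool) (cs : List Char) :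
    (pvRunWhile p cs).2.length ≤ cs.length := by
  induction cs with
  | nil => simp [pvRunWhile]
  | cons c cs ih =>
    simp only [pvRunWhile]
    split
    · simpa using Nat.le_succ_of_le ih
    · simp

-- A's while-loop over the index i, as recursion over the remaining characters.
def pvLoopA (cs : List Char) (toks : List String) (lns : List Int) (linea : Int) :
    List String × List Int :=
  match cs with
  | [] => (toks, lns)
  | c :: rest =>
    if c = '\n' then pvLoopA rest toks lns (linea + 1)
    else if PySem.Chars.isspace c then pvLoopA rest toks lns linea
    else if PySem.Chars.isalpha c then
      let r := pvRunWhile PySem.Chars.isalpha rest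
      pvLoopA r.2 (toks ++ [String.mk (c :: r.1)]) (lns ++ [linea]) linea
    else if PySem.Chars.isdigit c then
      let r := pvRunWhile PySem.Chars.isdigit rest
      pvLoopA r.2 (toks ++ [String.mk (c :: r.1)]) (lns ++ [linea]) linea
    else if PySem.Str.isIn (String.mk [c]) "{}();=+-*/%" then
      pvLoopA rest (toks ++ [String.mk [c]]) (lns ++ [linea]) linea
    else
      pvLoopA rest (toks ++ [String.mk [c]]) (lns ++ [linea]) linea
termination_by cs.length
decreasing_by
  all_goals simp_all
  all_goals exact pvRunWhile_snd_length_le _ _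

def tokenizar (fuente : String) : List String × List Int :=
  pvLoopA fuente.toList [] [] 1

-- ===== PORT B =====
structure PvSt where
  toks : List String
  lns : List Int
  buf : List Char
  cls : Option Bool    -- some true = alpha run, some false = digit run, none = no buffer
  linea : Int
deriving Repr, DecidableEq

def pvClassOf (c : Char) : Option Bool :=
  if PySem.Chars.isalpha c then some true
  else if PySem.Chars.isdigit c then some false
  else none

def pvFlush (st : PvSt) : PvSt :=
  if st.buf = [] then st
  else { st with toks := st.toks ++ [String.mk st.buf], lns := st.lns ++ [st.linea],
                 buf := [], cls := none }

def pvStep (st : PvSt) (c : Char) : PvSt :=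
  match pvClassOf c with
  | some b =>
    if st.cls = some b then { st with buf := st.buf ++ [c] }
    else
      let st' := pvFlush st
      { st' with buf := [c], cls := some b }
  | none =>
    let st' := pvFlush st
    if c = '\n' then { st' with linea := st'.linea + 1 }
    else if PySem.Chars.isspace c then st'
    else { st' with toks := st'.toks ++ [String.mk [c]], lns := st'.lns ++ [st'.linea] }

def tokenizar_alt (fuente : String) : List String × List Int :=
  let st := fuente.toList.foldl pvStep ⟨[], [], [], none, 1⟩
  let st := pvFlush st
  (st.toks, st.lns)

-- ===== PRECONDITION & SPEC =====
def Spec_tokenizar (fuente : String) (out : List String × List Int) : Prop := out = tokenizar_alt fuente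
instance (fuente : String) (out : List String × List Int) : Decidable (Spec_tokenizar fuente out) := by unfold Spec_tokenizar; infer_instance

-- ===== CLAIM (what is proved, stated in full; the proofs are below) =====
def Claim_equal_tokenizar : Prop := ∀ (fuente : String), Dom_tokenizar fuente → Spec_tokenizar fuente (tokenizar fuente)

-- ===== LEMMAS AND PROOFS =====
def pvFinish (st : PvSt) : List String × List Int := ((pvFlush st).toks, (pvFlush st).lns)

theorem pv_isspace_class (c : Char) (h : PySem.Chars.isspace c = true) :
    PySem.Chars.isalpha c = false ∧ PySem.Chars.isdigit c = false := by
  have hA : 'A'.val.toNat = 65 := rfl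
  have hZ : 'Z'.val.toNat = 90 := rfl
  have ha : 'a'.val.toNat = 97 := rfl
  have hz : 'z'.val.toNat = 122 := rfl
  have h0 : '0'.val.toNat = 48 := rfl
  have h9 : '9'.val.toNat = 57 := rfl
  simp only [PySem.Chars.isspace, Bool.or_eq_true, Bool.and_eq_true, decide_eq_true_eq] at h
  simp only [PySem.Chars.isalpha, PySem.Chars.isupper, PySem.Chars.islower, PySem.Chars.isdigit,
    Bool.or_eq_false_iff, Bool.and_eq_false_iff, decide_eq_false_iff_not, not_le,
    Char.le_def, UInt32.le_iff_toNat_le]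
  simp only [Char.toNat] at h ⊢
  omega

theorem pv_alpha_not_digit (c : Char) (h : PySem.Chars.isalpha c = true) :
    PySem.Chars.isdigit c = false := by
  have hA : 'A'.val.toNat = 65 := rfl
  have hZ : 'Z'.val.toNat = 90 := rfl
  have ha : 'a'.val.toNat = 97 := rfl
  have hz : 'z'.val.toNat = 122 := rfl
  have h0 : '0'.val.toNat = 48 := rfl
  have h9 : '9'.val.toNat = 57 := rfl
  simp only [PySem.Chars.isalpha, PySem.Chars.isupper, PySem.Chars.islower, Bool.or_eq_true,
    Bool.and_eq_true, decide_eq_true_eq, Char.le_def, UInt32.le_iff_toNat_le] at h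
  simp only [PySem.Chars.isdigit, Bool.and_eq_false_iff, decide_eq_false_iff_not, not_le,
    Char.le_def, UInt32.le_iff_toNat_le]
  omega

theorem pvP_true : (fun c => pvClassOf c == some true) = PySem.Chars.isalpha := by
  funext c
  by_cases h : PySem.Chars.isalpha c = true <;> simp [pvClassOf, h]

theorem pvP_false : (fun c => pvClassOf c == some false) = PySem.Chars.isdigit := by
  funext c
  by_cases h : PySem.Chars.isalpha c = true
  · simp [pvClassOf, h, pv_alpha_not_digit c h]
  · by_cases hd : PySem.Chars.isdigit c = true <;> simp [pvClassOf, h, hd]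

theorem pvRunWhile_eq (p : Char → Bool) (cs : List Char) :
    pvRunWhile p cs = (cs.takeWhile p, cs.dropWhile p) := by
  induction cs with
  | nil => simp [pvRunWhile]
  | cons c cs ih =>
    by_cases h : p c = true <;>
      simp [pvRunWhile, List.takeWhile_cons, List.dropWhile_cons, h, ih]

theorem pvDropWhile_head_false (p : Char → Bool) :
    ∀ (l : List Char) c t, l.dropWhile p = c :: t → p c = false := by
  intro l
  induction l with
  | nil => intro c t h; simp at h
  | cons a l ih =>
    intro c t h
    rw [List.dropWhile_cons] at h
    by_cases hp : p a = true
    · rw [if_pos hp] at h; exact ih _ _ h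
    · rw [if_neg hp] at h
      obtain ⟨rfl, -⟩ := List.cons.injEq .. ▸ h
      · simpa using hp

theorem pvFoldl_run (b : Bool) (cs : List Char) :
    ∀ toks lns buf linea,
      List.foldl pvStep ⟨toks, lns, buf, some b, linea⟩ cs =
      List.foldl pvStep
        ⟨toks, lns, buf ++ cs.takeWhile (fun c => pvClassOf c == some b), some b, linea⟩
        (cs.dropWhile (fun c => pvClassOf c == some b)) := by
  induction cs with
  | nil => simp
  | cons c rest ih =>
    intro toks lns buf linea
    by_cases hc : pvClassOf c = some b
    · have hstep : pvStep ⟨toks, lns, buf, some b, linea⟩ c = ⟨toks, lns, buf ++ [c], some b, linea⟩ := by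
        simp [pvStep, hc]
      rw [List.foldl_cons, hstep, ih]
      simp [List.takeWhile_cons, List.dropWhile_cons, hc]
    · simp [List.takeWhile_cons, List.dropWhile_cons, hc]

theorem pvStep_flush (st : PvSt) (c : Char) (h : pvClassOf c ≠ st.cls) :
    pvStep st c = pvStep (pvFlush st) c := by
  by_cases hb : st.buf = []
  · simp [pvFlush, hb]
  · cases hcl : pvClassOf c with
    | none => simp [pvStep, hcl, pvFlush, hb]
    | some b =>
      have hne : st.cls ≠ some b := by rw [hcl] at h; exact fun hh => h hh.symm
      simp [pvStep, hcl, pvFlush, hb, hne]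

theorem pvLoopA_eq (n : Nat) :
    ∀ cs : List Char, cs.length ≤ n → ∀ toks lns linea,
      pvLoopA cs toks lns linea =
        pvFinish (List.foldl pvStep ⟨toks, lns, [], none, linea⟩ cs) := by
  induction n with
  | zero =>
    intro cs hcs toks lns linea
    have : cs = [] := List.length_eq_zero_iff.mp (Nat.le_zero.mp hcs)
    subst this
    simp [pvLoopA, pvFinish, pvFlush]
  | succ n ih =>
    intro cs hcs toks lns linea
    match cs with
    | [] => simp [pvLoopA, pvFinish, pvFlush]
    | c :: rest =>
      have hlen : rest.length ≤ n := by simpa using hcs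
      have hdrop : ∀ p : Char → Bool, (rest.dropWhile p).length ≤ n := by
        intro p
        have h2 := pvRunWhile_snd_length_le p rest
        rw [pvRunWhile_eq] at h2
        exact le_trans h2 hlen
      rw [pvLoopA]
      by_cases hn : c = '\n'
      · subst hn
        have hcl : pvClassOf '\n' = none := by decide
        have hstep : pvStep ⟨toks, lns, [], none, linea⟩ '\n' = ⟨toks, lns, [], none, linea + 1⟩ := by
          simp [pvStep, hcl, pvFlush]
        rw [if_pos rfl, List.foldl_cons, hstep]
        exact ih rest hlen toks lns (linea + 1)
      · rw [if_neg hn]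
        by_cases hsp : PySem.Chars.isspace c = true
        · obtain ⟨hna, hnd⟩ := pv_isspace_class c hsp
          have hcl : pvClassOf c = none := by simp [pvClassOf, hna, hnd]
          have hstep : pvStep ⟨toks, lns, [], none, linea⟩ c = ⟨toks, lns, [], none, linea⟩ := by
            simp [pvStep, hcl, pvFlush, hn, hsp]
          rw [if_pos hsp, List.foldl_cons, hstep]
          exact ih rest hlen toks lns linea
        · rw [if_neg hsp]
          by_cases hca : PySem.Chars.isalpha c = true
          · -- alpha run
            have hcl : pvClassOf c = some true := by simp [pvClassOf, hca]
            have hstep : pvStep ⟨toks, lns, [], none, linea⟩ c = ⟨toks, lns, [c], some true, linea⟩ := by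
              simp [pvStep, hcl, pvFlush]
            rw [if_pos hca, List.foldl_cons, hstep, pvFoldl_run, pvP_true, pvRunWhile_eq]
            cases hdw : rest.dropWhile PySem.Chars.isalpha with
            | nil =>
              simp [pvLoopA, pvFinish, pvFlush]
            | cons c' rest' =>
              have hp : PySem.Chars.isalpha c' = false := pvDropWhile_head_false _ rest c' rest' hdw
              have hpc : pvClassOf c' ≠ some true := by
                simp only [pvClassOf, hp]
                split <;> simp_all
              rw [List.foldl_cons,
                pvStep_flush ⟨toks, lns, [c] ++ rest.takeWhile PySem.Chars.isalpha, some true, linea⟩ c' hpc,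
                show pvFlush ⟨toks, lns, [c] ++ rest.takeWhile PySem.Chars.isalpha, some true, linea⟩
                  = ⟨toks ++ [String.mk (c :: rest.takeWhile PySem.Chars.isalpha)], lns ++ [linea], [], none, linea⟩ from by simp [pvFlush],
                ← List.foldl_cons]
              have := ih (c' :: rest') (hdw ▸ hdrop PySem.Chars.isalpha)
                (toks ++ [String.mk (c :: rest.takeWhile PySem.Chars.isalpha)]) (lns ++ [linea]) linea
              exact this
          · rw [if_neg hca]
            by_cases hd : PySem.Chars.isdigit c = true
            · -- digit run
              have hna : PySem.Chars.isalpha c = false := by simpa using hca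
              have hcl : pvClassOf c = some false := by simp [pvClassOf, hna, hd]
              have hstep : pvStep ⟨toks, lns, [], none, linea⟩ c = ⟨toks, lns, [c], some false, linea⟩ := by
                simp [pvStep, hcl, pvFlush]
              rw [if_pos hd, List.foldl_cons, hstep, pvFoldl_run, pvP_false, pvRunWhile_eq]
              cases hdw : rest.dropWhile PySem.Chars.isdigit with
              | nil =>
                simp [pvLoopA, pvFinish, pvFlush]
              | cons c' rest' =>
                have hp : PySem.Chars.isdigit c' = false := pvDropWhile_head_false _ rest c' rest' hdw
                have hpc : pvClassOf c' ≠ some false := by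
                  simp only [pvClassOf, hp]
                  split <;> simp_all
                rw [List.foldl_cons,
                  pvStep_flush ⟨toks, lns, [c] ++ rest.takeWhile PySem.Chars.isdigit, some false, linea⟩ c' hpc,
                  show pvFlush ⟨toks, lns, [c] ++ rest.takeWhile PySem.Chars.isdigit, some false, linea⟩
                    = ⟨toks ++ [String.mk (c :: rest.takeWhile PySem.Chars.isdigit)], lns ++ [linea], [], none, linea⟩ from by simp [pvFlush],
                  ← List.foldl_cons]
                exact ih (c' :: rest') (hdw ▸ hdrop PySem.Chars.isdigit)
                  (toks ++ [String.mk (c :: rest.takeWhile PySem.Chars.isdigit)]) (lns ++ [linea]) linea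
            · -- operator or any other character: singleton token (both A-branches identical)
              have hna : PySem.Chars.isalpha c = false := by simpa using hca
              have hnd : PySem.Chars.isdigit c = false := by simpa using hd
              have hcl : pvClassOf c = none := by simp [pvClassOf, hna, hnd]
              have hstep : pvStep ⟨toks, lns, [], none, linea⟩ c
                  = ⟨toks ++ [String.mk [c]], lns ++ [linea], [], none, linea⟩ := by
                simp [pvStep, hcl, pvFlush, hn, hsp]
              rw [if_neg hd, List.foldl_cons, hstep]
              split <;> exact ih rest hlen (toks ++ [String.mk [c]]) (lns ++ [linea]) linea

-- ===== VERDICT (by name: the statement is the Claim_ definition above) =====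
theorem tokenizar_spec : Claim_equal_tokenizar := by
  intro fuente _
  unfold Spec_tokenizar tokenizar tokenizar_alt
  rw [pvLoopA_eq fuente.toList.length fuente.toList le_rfl]
  rfl
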